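-- pv_equiv track=rewrite | github.com/felixphool/Programming-Practice-C-Cpp | Practice Assignments/ASSIGNMENT 55/try2.py | solution
-- ===== SOURCE A (Python) =====
-- def product_of_even_digits(rating):
--     product = 1
--     for digit in rating:
--         digit = int(digit)
--         if digit % 2 == 0 and digit != 0:
--             product *= digit
--     return product
--
-- def product_of_odd_digits(rating):
--     product = 1
--     for digit in rating:
--         digit = int(digit)
--         if digit % 2 != 0:
--             product *= digit
--     return product
--
-- def calculate_bonus_rating(rating):
--     even_product = product_of_even_digits(rating)
--     odd_product = product_of_odd_digits(rating)
--     bonus_rating = even_product - odd_product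
--     return bonus_rating if bonus_rating >= 0 else 0
--
-- def solution(input_from_question):
--     input_list = input_from_question.strip().split()
--     n = int(input_list[0])
--     movie_ratings = list(map(int, input_list[1:]))
--
--     bonus_ratings = []
--     for rating in movie_ratings:
--         rating_str = str(rating)
--         bonus_ratings.append(calculate_bonus_rating(rating_str))
--
--     return ' '.join(str(bonus) for bonus in bonus_ratings)
-- ===== SOURCE B (Python) =====
-- def solution(input_from_question):
--     n, *ratings = (int(t) for t in input_from_question.strip().split())
--     bonuses = []
--     for r in ratings:
--         even = odd = 1
--         while r > 0:
--             d = r % 10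
--             if d % 2 == 1:
--                 odd *= d
--             elif d != 0:
--                 even *= d
--             r //= 10
--         bonuses.append(str(max(even - odd, 0)))
--     return ' '.join(bonuses)
-- ===== Notes on version B (the rewrite author's own statement) =====
-- stated objective: alternative
-- what changed: B drops the two helper string scans and the str(rating) round-trip entirely: it extracts each rating's digits arithmetically (n % 10, n //= 10) in one loop, maintaining both products at once, and clamps with max(bonus, 0).
import Mathlib
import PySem

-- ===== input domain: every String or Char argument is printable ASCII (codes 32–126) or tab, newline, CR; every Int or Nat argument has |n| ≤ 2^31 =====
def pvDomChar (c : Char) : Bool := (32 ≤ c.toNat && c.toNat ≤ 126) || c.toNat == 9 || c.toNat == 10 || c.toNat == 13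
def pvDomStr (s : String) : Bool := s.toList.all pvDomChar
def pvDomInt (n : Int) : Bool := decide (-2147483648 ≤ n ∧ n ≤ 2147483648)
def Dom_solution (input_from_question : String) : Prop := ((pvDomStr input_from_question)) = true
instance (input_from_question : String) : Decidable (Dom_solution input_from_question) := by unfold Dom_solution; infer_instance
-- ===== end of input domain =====

-- B replaces A's two per-rating string scans (and the str() round-trip) by one arithmetic
-- digit loop (n % 10 / n //= 10) maintaining both products at once; same output, same cost.


-- ===== PORT A =====
-- int(digit) on one character of str(rating); the .getD 0 is unreachable inside Pre_
-- (ratings are nonnegative there, so str(rating) consists of digit characters only).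
def pyDigitInt (c : Char) : Int := (PySem.Int.ofStr? (String.ofList [c])).getD 0

def product_of_even_digits (rating : List Char) : Int :=
  rating.foldl (fun product c =>
    let digit := pyDigitInt c
    if PySem.Int.mod digit 2 = 0 ∧ digit ≠ 0 then product * digit else product) 1

def product_of_odd_digits (rating : List Char) : Int :=
  rating.foldl (fun product c =>
    let digit := pyDigitInt c
    if PySem.Int.mod digit 2 ≠ 0 then product * digit else product) 1

def calculate_bonus_rating (rating : List Char) : Int :=
  let even_product := product_of_even_digits rating
  let odd_product := product_of_odd_digits rating
  let bonus_rating := even_product - odd_product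
  if bonus_rating ≥ 0 then bonus_rating else 0

def solution (input_from_question : String) : String :=
  let input_list := PySem.Str.split₀ (PySem.Str.strip input_from_question)
  -- n = int(input_list[0]) : value unused; it only raises on an empty or unparseable
  -- first token, which Pre_ excludes.  map int over input_list[1:]: ValueError (none)
  -- is excluded by Pre_, so .getD 0 is unreachable there.
  let movie_ratings := input_list.tail.map (fun t => (PySem.Int.ofStr? t).getD 0)
  let bonus_ratings := movie_ratings.map
    (fun rating => calculate_bonus_rating (PySem.Int.toChars rating))
  PySem.Str.join " " (bonus_ratings.map (fun bonus => PySem.Int.toStr bonus))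

-- ===== PORT B =====
-- the while-loop of Source B: n > 0 → take d = n % 10, multiply it into the odd or even
-- product, continue with n // 10
def bonusDigits (n even odd : Int) : Int × Int :=
  if h : 0 < n then
    let d := PySem.Int.mod n 10
    let rest := PySem.Int.floordiv n 10
    if PySem.Int.mod d 2 = 1 then bonusDigits rest even (odd * d)
    else if d ≠ 0 then bonusDigits rest (even * d) odd
    else bonusDigits rest even odd
  else (even, odd)
termination_by n.toNat
decreasing_by all_goals
  · simp only [PySem.Int.floordiv, Int.fdiv_eq_ediv_of_nonneg _ (by omega : (0:Int) ≤ 10)]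
    omega

def solution_alt (input_from_question : String) : String :=
  -- n, *ratings = (int(t) for t in ...): raises on an empty token list or an
  -- unparseable token, both excluded by Pre_ (so .getD 0 is unreachable there)
  let nums := (PySem.Str.split₀ (PySem.Str.strip input_from_question)).map
    (fun t => (PySem.Int.ofStr? t).getD 0)
  let ratings := nums.tail
  let bonuses := ratings.map (fun r =>
    let p := bonusDigits r 1 1
    PySem.Int.toStr (max (p.1 - p.2) 0))
  PySem.Str.join " " bonuses

-- ===== PRECONDITION & SPEC =====
-- Pre_ = exactly the inputs on which A returns: at least one whitespace-separated token,
-- every token parses as an int, and every rating (token after the first) is nonnegative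
-- (on a negative rating A raises ValueError when it feeds the minus sign to int).
def Pre_solution (input_from_question : String) : Prop :=
  let toks := PySem.Str.split₀ (PySem.Str.strip input_from_question)
  toks ≠ [] ∧ (∀ t ∈ toks, (PySem.Int.ofStr? t).isSome = true) ∧
  (∀ t ∈ toks.tail, 0 ≤ (PySem.Int.ofStr? t).getD 0)
instance (input_from_question : String) : Decidable (Pre_solution input_from_question) := by
  unfold Pre_solution; infer_instance

def pvWitness_solution : String := "3 12 305 7"

def Spec_solution (input_from_question : String) (out : String) : Prop := out = solution_alt input_from_question
instance (input_from_question : String) (out : String) : Decidable (Spec_solution input_from_question out) := by unfold Spec_solution; infer_instance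

-- ===== CLAIM (what is proved, stated in full; the proofs are below) =====
def Claim_equal_solution : Prop := ∀ (input_from_question : String), Dom_solution input_from_question → Pre_solution input_from_question → Spec_solution input_from_question (solution input_from_question)

-- ===== LEMMAS AND PROOFS =====

-- the digit list of n, most significant first (mirrors Nat.toDigits)
def digs (n : Nat) : List Nat :=
  if h : n < 10 then [n] else digs (n / 10) ++ [n % 10]
decreasing_by exact Nat.div_lt_self (by omega) (by omega)

-- even / odd digit products of n, least significant first (mirrors bonusDigits)
def En (n : Nat) : Int :=
  if h : n = 0 then 1
  else if n % 10 % 2 = 0 ∧ n % 10 ≠ 0 then En (n / 10) * ((n % 10 : Nat) : Int) else En (n / 10)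
decreasing_by all_goals exact Nat.div_lt_self (by omega) (by omega)

def On (n : Nat) : Int :=
  if h : n = 0 then 1
  else if n % 10 % 2 ≠ 0 then On (n / 10) * ((n % 10 : Nat) : Int) else On (n / 10)
decreasing_by all_goals exact Nat.div_lt_self (by omega) (by omega)

theorem toDigitsCore_eq (f : Nat) : ∀ (n : Nat) (ds : List Char), n < f →
    Nat.toDigitsCore 10 f n ds = (digs n).map Nat.digitChar ++ ds := by
  induction f with
  | zero => intro n ds h; omega
  | succ f ih =>
    intro n ds h
    rw [Nat.toDigitsCore]
    by_cases h10 : n < 10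
    · have : n / 10 = 0 := Nat.div_eq_of_lt h10
      simp [this, digs, h10, Nat.mod_eq_of_lt h10]
    · have hne : ¬ n / 10 = 0 := by omega
      simp only [hne, if_false]
      rw [ih (n / 10) _ (by omega)]
      conv_rhs => rw [digs]
      simp [h10]

theorem toChars_nonneg (v : Int) (hv : 0 ≤ v) :
    PySem.Int.toChars v = (digs v.toNat).map Nat.digitChar := by
  rw [PySem.Int.toChars, if_neg (by omega), Nat.toDigits]
  simpa using toDigitsCore_eq _ _ [] (Nat.lt_succ_self _)

theorem pyDigitInt_digitChar (d : Nat) (hd : d < 10) :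
    pyDigitInt (Nat.digitChar d) = (d : Int) := by
  interval_cases d <;> decide

theorem mod2_cast (m : Nat) : PySem.Int.mod (m : Int) 2 = ((m % 2 : Nat) : Int) := by
  rw [PySem.Int.mod, Int.fmod_eq_emod]; simp

theorem mod10_cast (m : Nat) : PySem.Int.mod (m : Int) 10 = ((m % 10 : Nat) : Int) := by
  rw [PySem.Int.mod, Int.fmod_eq_emod]; simp

theorem fdiv10_cast (n : Nat) : PySem.Int.floordiv (n : Int) 10 = ((n / 10 : Nat) : Int) := by
  rw [PySem.Int.floordiv, Int.fdiv_eq_ediv_of_nonneg _ (by norm_num)]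
  push_cast; rfl

theorem even_fold (n : Nat) : ∀ (acc : Int),
    ((digs n).map Nat.digitChar).foldl (fun product c =>
      let digit := pyDigitInt c
      if PySem.Int.mod digit 2 = 0 ∧ digit ≠ 0 then product * digit else product) acc
    = acc * En n := by
  induction n using Nat.strongRecOn with
  | ind n ih =>
    intro acc
    by_cases h10 : n < 10
    · rw [digs, dif_pos h10]
      simp only [List.map_cons, List.map_nil, List.foldl_cons, List.foldl_nil,
        pyDigitInt_digitChar n h10]
      rw [En]
      by_cases h0 : n = 0
      · subst h0; simp
      · rw [dif_neg h0]
        have hd : n / 10 = 0 := Nat.div_eq_of_lt h10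
        have hm : n % 10 = n := Nat.mod_eq_of_lt h10
        have hc : (PySem.Int.mod (n : Int) 2 = 0 ∧ (n : Int) ≠ 0) ↔
            (n % 10 % 2 = 0 ∧ n % 10 ≠ 0) := by
          rw [mod2_cast n, hm]
          constructor <;> intro ⟨a, b⟩ <;> constructor <;> omega
        rw [if_congr hc rfl rfl]
        split_ifs with hcond
        · rw [hd, En]; simp [hm]
        · rw [hd, En]; simp
    · rw [digs, dif_neg h10]
      rw [List.map_append, List.foldl_append, ih (n / 10) (Nat.div_lt_self (by omega) (by omega)) acc]
      simp only [List.map_cons, List.map_nil, List.foldl_cons, List.foldl_nil,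
        pyDigitInt_digitChar (n % 10) (Nat.mod_lt n (by omega))]
      have hc : (PySem.Int.mod ((n % 10 : Nat) : Int) 2 = 0 ∧ ((n % 10 : Nat) : Int) ≠ 0) ↔
          (n % 10 % 2 = 0 ∧ n % 10 ≠ 0) := by
        rw [mod2_cast (n % 10)]
        constructor <;> intro ⟨a, b⟩ <;> constructor <;> omega
      rw [if_congr hc rfl rfl]
      conv_rhs => rw [En, dif_neg (by omega : ¬ n = 0)]
      split_ifs with hcond
      · ring
      · rfl

theorem odd_fold (n : Nat) : ∀ (acc : Int),
    ((digs n).map Nat.digitChar).foldl (fun product c =>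
      let digit := pyDigitInt c
      if PySem.Int.mod digit 2 ≠ 0 then product * digit else product) acc
    = acc * On n := by
  induction n using Nat.strongRecOn with
  | ind n ih =>
    intro acc
    by_cases h10 : n < 10
    · rw [digs, dif_pos h10]
      simp only [List.map_cons, List.map_nil, List.foldl_cons, List.foldl_nil,
        pyDigitInt_digitChar n h10]
      rw [On]
      by_cases h0 : n = 0
      · subst h0; simp
      · rw [dif_neg h0]
        have hd : n / 10 = 0 := Nat.div_eq_of_lt h10
        have hm : n % 10 = n := Nat.mod_eq_of_lt h10
        have hc : (PySem.Int.mod (n : Int) 2 ≠ 0) ↔ (n % 10 % 2 ≠ 0) := by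
          rw [mod2_cast n, hm]; constructor <;> intro a <;> omega
        rw [if_congr hc rfl rfl]
        split_ifs with hcond
        · rw [hd, On]; simp [hm]
        · rw [hd, On]; simp
    · rw [digs, dif_neg h10]
      rw [List.map_append, List.foldl_append, ih (n / 10) (Nat.div_lt_self (by omega) (by omega)) acc]
      simp only [List.map_cons, List.map_nil, List.foldl_cons, List.foldl_nil,
        pyDigitInt_digitChar (n % 10) (Nat.mod_lt n (by omega))]
      have hc : (PySem.Int.mod ((n % 10 : Nat) : Int) 2 ≠ 0) ↔ (n % 10 % 2 ≠ 0) := by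
        rw [mod2_cast (n % 10)]; constructor <;> intro a <;> omega
      rw [if_congr hc rfl rfl]
      conv_rhs => rw [On, dif_neg (by omega : ¬ n = 0)]
      split_ifs with hcond
      · ring
      · rfl

theorem bonusDigits_eq (n : Nat) : ∀ (e o : Int),
    bonusDigits (n : Int) e o = (e * En n, o * On n) := by
  induction n using Nat.strongRecOn with
  | ind n ih =>
    intro e o
    by_cases h0 : n = 0
    · subst h0
      rw [bonusDigits, dif_neg (by norm_num), En, On]
      simp
    · rw [bonusDigits, dif_pos (by exact_mod_cast Nat.pos_of_ne_zero h0)]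
      simp only [mod10_cast n, fdiv10_cast n]
      have hlt : n / 10 < n := Nat.div_lt_self (Nat.pos_of_ne_zero h0) (by norm_num)
      have hmod2 : PySem.Int.mod ((n % 10 : Nat) : Int) 2 = ((n % 10 % 2 : Nat) : Int) :=
        mod2_cast (n % 10)
      rw [En, On, dif_neg h0, dif_neg h0]
      by_cases hodd : n % 10 % 2 = 1
      · rw [if_pos (by rw [hmod2, hodd]; rfl), ih (n / 10) hlt]
        rw [if_neg (by omega), if_pos (by omega)]
        refine Prod.ext rfl ?_
        push_cast; ring
      · rw [if_neg (by rw [hmod2]; exact_mod_cast (by omega : ¬ (n % 10 % 2 : Int) = 1))]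
        by_cases hz : n % 10 = 0
        · rw [if_neg (by simp [hz]), ih (n / 10) hlt]
          rw [if_neg (by omega), if_neg (by omega)]
        · rw [if_pos (by exact_mod_cast hz), ih (n / 10) hlt]
          rw [if_pos (by omega), if_neg (by omega)]
          refine Prod.ext ?_ rfl
          push_cast; ring

theorem per_rating (v : Int) (hv : 0 ≤ v) :
    calculate_bonus_rating (PySem.Int.toChars v)
      = max ((bonusDigits v 1 1).1 - (bonusDigits v 1 1).2) 0 := by
  have hb := bonusDigits_eq v.toNat 1 1
  rw [Int.toNat_of_nonneg hv] at hb
  rw [calculate_bonus_rating, product_of_even_digits, product_of_odd_digits,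
    toChars_nonneg v hv, even_fold, odd_fold, hb]
  simp only [one_mul]
  omega

-- ===== VERDICT (by name: the statement is the Claim_ definition above) =====
theorem solution_spec : Claim_equal_solution := by
  intro s _ hpre
  obtain ⟨-, -, hnn⟩ := hpre
  show solution s = solution_alt s
  simp only [solution, solution_alt, List.map_map, List.map_tail.symm]
  refine congrArg (PySem.Str.join " ") ?_
  refine List.map_congr_left ?_
  intro t ht
  have hv := hnn t ht
  simp only [Function.comp_apply]
  rw [per_rating _ hv]
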